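-- pv_equiv track=rewrite | github.com/Samet-Hodaman/Advent-of-Code-2023- | Advent of Code/Day12- Hot Springs/day12.py | isSuitable
-- ===== SOURCE A (Python) =====
-- def isSuitable(spring : str, damaged : list) -> bool:
--     parts = []
--
--     part = ""
--     for char in spring:
--         if char == "#":
--             part += char
--         elif char == ".":
--             if not part == "":
--                 parts.append(part)
--                 part = ""
--     if not part == "":
--         parts.append(part)
--         part = ""
--
--     if not len(parts) == len(damaged):
--         return False
--
--     for i in range(0,len(parts)):
--         if not len(parts[i]) ==  (int)(damaged[i]):
--             return False
--
--     return True
-- ===== SOURCE B (Python) =====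
-- def isSuitable(spring: str, damaged: list) -> bool:
--     # Streaming matcher: one pass over the string, consuming expected run
--     # lengths from damaged on the fly (no intermediate list of runs is built),
--     # with early exit on the first mismatch.
--     i = 0                 # next index into damaged
--     remaining = None      # None = not inside a '#' run; else chars left in the current run
--     for char in spring:
--         if char == '#':
--             if remaining is None:
--                 if i == len(damaged):
--                     return False
--                 remaining = int(damaged[i])
--                 i += 1
--             if remaining <= 0:
--                 return False
--             remaining -= 1
--         elif char == '.':
--             if remaining is not None:
--                 if remaining != 0:
--                     return False
--                 remaining = None
--     if remaining is not None and remaining != 0: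
--         return False
--     return i == len(damaged)
-- ===== Notes on version B (the rewrite author's own statement) =====
-- stated objective: alternative
-- what changed: Replaces A's two-stage build-all-run-strings-then-length-check-and-index-loop with a single streaming pass that consumes the expected counts from damaged on the fly (no intermediate list of runs) and exits early on the first mismatch.
import Mathlib
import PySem

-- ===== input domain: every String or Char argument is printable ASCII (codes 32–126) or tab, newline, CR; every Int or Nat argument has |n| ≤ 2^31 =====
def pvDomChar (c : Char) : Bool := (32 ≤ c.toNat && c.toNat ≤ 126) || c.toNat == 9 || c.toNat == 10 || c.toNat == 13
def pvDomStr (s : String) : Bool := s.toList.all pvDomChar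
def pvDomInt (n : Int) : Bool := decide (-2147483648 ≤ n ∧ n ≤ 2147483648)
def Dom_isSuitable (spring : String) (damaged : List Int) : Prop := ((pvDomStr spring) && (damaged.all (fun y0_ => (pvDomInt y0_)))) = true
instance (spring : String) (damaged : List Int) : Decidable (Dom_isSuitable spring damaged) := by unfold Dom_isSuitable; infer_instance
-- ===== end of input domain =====

-- B replaces A's build-all-runs-then-compare with a single streaming pass that
-- consumes the expected counts from damaged on the fly; objective: alternative.

-- ===== PORT A =====
-- the loop body: state = (parts, part); chars other than '#' and '.' are ignored
def pvStepA (st : List (List Char) × List Char) (c : Char) : List (List Char) × List Char :=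
  if c == '#' then (st.1, st.2 ++ [c])
  else if c == '.' then
    (if st.2 ≠ [] then (st.1 ++ [st.2], ([] : List Char)) else st)
  else st

-- the post-loop "if not part == ''" flush
def pvFlushA (st : List (List Char) × List Char) : List (List Char) :=
  if st.2 ≠ [] then st.1 ++ [st.2] else st.1

-- the index loop: for i in range(0, len(parts)): if not len(parts[i]) == int(damaged[i]): return False
def pvCheckA : List (List Char) → List Int → Bool
  | [], _ => true
  | _ :: _, [] => true    -- unreachable: lengths are equal when this loop runs
  | p :: ps, d :: ds => if ((p.length : Int) == d) then pvCheckA ps ds else false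

def isSuitable (spring : String) (damaged : List Int) : Bool :=
  let parts := pvFlushA (spring.toList.foldl pvStepA ([], []))
  if parts.length == damaged.length then pvCheckA parts damaged else false

-- ===== PORT B =====
-- state carried through Source B's loop: the not-yet-consumed suffix of damaged
-- (Source B indexes with i; consuming from the front of the list is the same walk)
-- and `remaining` (Python's None/int variable).
def pvMatch : List Char → Option Int → List Int → Bool
  | [], e, ds =>
      (match e with
       | some k => k == 0
       | none => true) && ds.isEmpty
  | c :: cs, e, ds =>
      if c == '#' then
        match e with
        | none =>
          match ds with
          | [] => false
          | d :: ds' => if d ≤ 0 then false else pvMatch cs (some (d - 1)) ds'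
        | some k => if k ≤ 0 then false else pvMatch cs (some (k - 1)) ds
      else if c == '.' then
        match e with
        | some k => if k != 0 then false else pvMatch cs none ds
        | none => pvMatch cs none ds
      else pvMatch cs e ds

def isSuitable_alt (spring : String) (damaged : List Int) : Bool :=
  pvMatch spring.toList none damaged

-- ===== PRECONDITION & SPEC =====
def Spec_isSuitable (spring : String) (damaged : List Int) (out : Bool) : Prop := out = isSuitable_alt spring damaged
instance (spring : String) (damaged : List Int) (out : Bool) : Decidable (Spec_isSuitable spring damaged out) := by unfold Spec_isSuitable; infer_instance

-- ===== CLAIM (what is proved, stated in full; the proofs are below) =====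
def Claim_equal_isSuitable : Prop := ∀ (spring : String) (damaged : List Int), Dom_isSuitable spring damaged → Spec_isSuitable spring damaged (isSuitable spring damaged)

-- ===== LEMMAS AND PROOFS =====

-- proof-only reference function: the damaged-run lengths of a char list,
-- with an optional in-progress run length
def pvRunsAux : List Char → Option Int → List Int
  | [], none => []
  | [], some k => [k]
  | c :: cs, e =>
      if c == '#' then pvRunsAux cs (some (e.getD 0 + 1))
      else if c == '.' then
        match e with
        | some k => k :: pvRunsAux cs none
        | none => pvRunsAux cs none
      else pvRunsAux cs e

-- with an open run, the result is a shifted head on a fixed tail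
theorem pvRunsAux_some (cs : List Char) :
    ∃ (n : ℕ) (t : List Int), ∀ a : Int, pvRunsAux cs (some a) = (a + n) :: t := by
  induction cs with
  | nil => exact ⟨0, [], fun a => by simp [pvRunsAux]⟩
  | cons c cs ih =>
    by_cases h1 : c = '#'
    · subst h1
      obtain ⟨n, t, h⟩ := ih
      refine ⟨n + 1, t, fun a => ?_⟩
      have hu : pvRunsAux ('#' :: cs) (some a) = pvRunsAux cs (some (a + 1)) := by
        simp [pvRunsAux]
      rw [hu, h (a + 1)]
      congr 1
      push_cast; ring
    · by_cases h2 : c = '.'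
      · exact ⟨0, pvRunsAux cs none, fun a => by simp [pvRunsAux, h1, h2]⟩
      · obtain ⟨n, t, h⟩ := ih
        exact ⟨n, t, fun a => by simpa [pvRunsAux, h1, h2] using h a⟩

-- A's two-stage check (length test + index loop) is list equality of the run lengths
theorem pvCheckA_eq (ps : List (List Char)) (ds : List Int) :
    (if ps.length == ds.length then pvCheckA ps ds else false)
      = (ps.map (fun p => (p.length : Int)) == ds) := by
  induction ps generalizing ds with
  | nil => cases ds <;> simp [pvCheckA]
  | cons p ps ih =>
    cases ds with
    | nil => simp
    | cons d ds =>
      by_cases h : (p.length : Int) = d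
      · simpa [pvCheckA, h] using ih ds
      · simp [pvCheckA, h]

-- A's fold+flush collects exactly the runs described by pvRunsAux
theorem pvFoldA_runs (cs : List Char) (parts : List (List Char)) (part : List Char) :
    (pvFlushA (cs.foldl pvStepA (parts, part))).map (fun p => (p.length : Int))
      = parts.map (fun p => (p.length : Int))
        ++ pvRunsAux cs (if part.isEmpty then none else some (part.length : Int)) := by
  induction cs generalizing parts part with
  | nil => cases part <;> simp [pvFlushA, pvRunsAux]
  | cons c cs ih =>
    by_cases h1 : c = '#'
    · subst h1
      have hstep : pvStepA (parts, part) '#' = (parts, part ++ ['#']) := by simp [pvStepA]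
      rw [List.foldl_cons, hstep, ih parts (part ++ ['#'])]
      cases part <;> simp [pvRunsAux]
    · by_cases h2 : c = '.'
      · subst h2
        cases part with
        | nil =>
          have hstep : pvStepA (parts, ([] : List Char)) '.' = (parts, []) := by simp [pvStepA]
          rw [List.foldl_cons, hstep, ih parts []]
          simp [pvRunsAux, h1]
        | cons a t =>
          have hstep : pvStepA (parts, a :: t) '.' = (parts ++ [a :: t], []) := by
            simp [pvStepA]
          rw [List.foldl_cons, hstep, ih (parts ++ [a :: t]) []]
          simp [pvRunsAux, h1]
      · have hstep : pvStepA (parts, part) c = (parts, part) := by simp [pvStepA, h1, h2]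
        rw [List.foldl_cons, hstep, ih parts part]
        simp [pvRunsAux, h1, h2]

-- B's streaming matcher decides equality of the run lengths with damaged
theorem pvMatch_eq (cs : List Char) :
    (∀ ds, pvMatch cs none ds = (pvRunsAux cs none == ds)) ∧
    (∀ k ds, pvMatch cs (some k) ds = (pvRunsAux cs (some 0) == k :: ds)) := by
  induction cs with
  | nil =>
    constructor
    · intro ds; cases ds <;> simp [pvMatch, pvRunsAux]
    · intro k ds; cases ds <;> simp [pvMatch, pvRunsAux, eq_comm]
  | cons c cs ih =>
    obtain ⟨ih1, ih2⟩ := ih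
    by_cases h1 : c = '#'
    · subst h1
      obtain ⟨n, t, h⟩ := pvRunsAux_some cs
      constructor
      · intro ds
        cases ds with
        | nil =>
          simp only [pvMatch, pvRunsAux]
          rw [show ((none : Option Int).getD 0 + 1) = (1 : Int) by simp, h 1]
          simp
        | cons d ds' =>
          simp only [pvMatch, pvRunsAux]
          rw [show ((none : Option Int).getD 0 + 1) = (1 : Int) by simp, h 1]
          by_cases hd : d ≤ 0
          · have hne : ¬ ((1 : Int) + n = d) := by omega
            simp [hd, hne]
          · simp only [hd, if_false, ih2 (d - 1) ds', h 0]
            simp only [List.cons_beq_cons, Int.zero_add]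
            have hb : (((n : Int)) == d - 1) = (((1 : Int) + n) == d) := by
              rcases eq_or_ne ((n : Int)) (d - 1) with hx | hx
              · simp [hx, show (1 : Int) + n = d by omega]
              · simp [hx, show ¬((1 : Int) + n = d) by omega]
            rw [hb]
            simp [List.cons_beq_cons]
      · intro k ds
        simp only [pvMatch, pvRunsAux]
        rw [show ((some (0:Int)).getD 0 + 1) = (1 : Int) by simp, h 1]
        by_cases hk : k ≤ 0
        · have hne : ¬ ((1 : Int) + n = k) := by omega
          simp [hk, hne]
        · simp only [hk, if_false, ih2 (k - 1) ds, h 0]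
          simp only [List.cons_beq_cons, Int.zero_add]
          have hb : (((n : Int)) == k - 1) = (((1 : Int) + n) == k) := by
            rcases eq_or_ne ((n : Int)) (k - 1) with hx | hx
            · simp [hx, show (1 : Int) + n = k by omega]
            · simp [hx, show ¬((1 : Int) + n = k) by omega]
          rw [hb]
          simp [List.cons_beq_cons]
    · by_cases h2 : c = '.'
      · subst h2
        constructor
        · intro ds; simp [pvMatch, pvRunsAux, ih1 ds]
        · intro k ds
          simp only [pvMatch, pvRunsAux]
          by_cases hk : k = 0
          · subst hk; simp [ih1 ds]
          · simp [hk, Ne.symm hk]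
      · constructor
        · intro ds; simp [pvMatch, pvRunsAux, h1, h2, ih1 ds]
        · intro k ds; simp [pvMatch, pvRunsAux, h1, h2, ih2 k ds]

-- ===== VERDICT (by name: the statement is the Claim_ definition above) =====
theorem isSuitable_spec : Claim_equal_isSuitable := by
  intro spring damaged _
  unfold Spec_isSuitable isSuitable isSuitable_alt
  rw [pvCheckA_eq, pvFoldA_runs spring.toList [] []]
  rw [(pvMatch_eq spring.toList).1 damaged]
  simp
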